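-- pv_equiv track=rewrite | github.com/colleenjg/OpenScope_CA_Analysis | util/logreg_util.py | get_sc_names
-- ===== SOURCE A (Python) =====
-- def get_sc_types(info='label'):
--     """
--     get_sc_types()
--
--     Returns info about the four score types: either labels, titles, list
--     indices, or lists to track scores within an epoch.
--
--     Optional args:
--         - info (str)  : type of info to return (label, title, idx or track)
--                         default: 'label'
--
--     Returns:
--         if info == 'label':
--             - label (list): list of score type labels
--         elif info == 'title':
--             - title (list): list of score type titles
--     """
--
--     label = ['loss', 'acc', 'acc_class0', 'acc_class1', 'acc_bal']
--
--     if info == 'label':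
--         return label
--
--     elif info == 'title':
--         title = ['Loss', 'Accuracy (%)', 'Accuracy on class0 trials (%)',
--                  'Accuracy on class1 trials (%)', 'Balanced accuracy (%)']
--         return title
--
-- def get_sc_names(loss_name, classes):
--     """
--     get_sc_names(loss_name, classes)
--
--     Returns specific score names, incorporating name of type of loss function
--     and the class names.
--
--     Required args:
--         - loss_name (str): name of loss function
--         - classes (list) : list of names of each class
--
--     Returns:
--         - sc_names (list): list of specific score names
--     """
--
--     sc_names = get_sc_types(info='title')
--     for i, sc_name in enumerate(sc_names):
--         if sc_name.lower() == 'loss':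
--             sc_names[i] = loss_name
--         for j, class_name in enumerate(classes):
--             generic = 'class{}'.format(j)
--             if generic in sc_name:
--                 sc_names[i] = sc_name.replace(generic, class_name)
--
--     return sc_names
-- ===== SOURCE B (Python) =====
-- def get_sc_names(loss_name, classes):
--     first = classes[0] if len(classes) > 0 else 'class0'
--     second = classes[1] if len(classes) > 1 else 'class1'
--     return [loss_name,
--             'Accuracy (%)',
--             'Accuracy on {} trials (%)'.format(first),
--             'Accuracy on {} trials (%)'.format(second),
--             'Balanced accuracy (%)']
-- ===== Notes on version B (the rewrite author's own statement) =====
-- stated objective: faster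
-- what changed: B drops A's per-title inner scan over all class names (building 'class{j}' strings and substring-testing each of the 5 titles against every class) and instead constructs the five score names directly, substituting only the first two class names, since only titles 2 and 3 mention a class.
import Mathlib
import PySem

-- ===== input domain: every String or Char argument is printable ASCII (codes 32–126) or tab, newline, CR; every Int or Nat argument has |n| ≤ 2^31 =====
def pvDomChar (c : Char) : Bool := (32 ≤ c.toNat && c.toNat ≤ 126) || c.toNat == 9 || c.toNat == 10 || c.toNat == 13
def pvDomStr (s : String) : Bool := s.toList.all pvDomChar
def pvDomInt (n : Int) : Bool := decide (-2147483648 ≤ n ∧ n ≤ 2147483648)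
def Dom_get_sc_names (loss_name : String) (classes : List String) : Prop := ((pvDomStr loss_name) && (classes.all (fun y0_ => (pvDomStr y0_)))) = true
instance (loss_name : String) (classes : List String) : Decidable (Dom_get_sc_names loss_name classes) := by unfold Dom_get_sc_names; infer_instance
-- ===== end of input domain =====

-- B replaces A's per-title scan over all class names by a direct construction of the five
-- score names from the first two class names (only titles 2 and 3 ever mention a class).

-- ===== PORT A =====
-- Helper mirroring Python's get_sc_types(info): `none` where the Python function falls off
-- the end and returns None (only info='label'/'title' yield a list).
def get_sc_types (info : String) : Option (List String) :=
  let label := ["loss", "acc", "acc_class0", "acc_class1", "acc_bal"]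
  if info == "label" then some label
  else if info == "title" then
    some ["Loss", "Accuracy (%)", "Accuracy on class0 trials (%)",
          "Accuracy on class1 trials (%)", "Balanced accuracy (%)"]
  else none

-- Body of A's inner `for j, class_name in enumerate(classes)` loop: Python tests
-- `generic in sc_name` and replaces in `sc_name` (the ORIGINAL title), not in the accumulator.
def pvClassStep (sc_name : String) (acc : String) (jc : Int × String) : String :=
  let generic := "class" ++ PySem.Int.toStr jc.1
  if PySem.Str.isIn generic sc_name then PySem.Str.replace sc_name generic jc.2 else acc

-- A's outer loop body for one title (Python writes sc_names[i]; only position i is ever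
-- written while visiting i, so the pass is a map over the titles).
def pvProcessTitle (loss_name : String) (classes : List String) (sc_name : String) : String :=
  let start := if PySem.Str.lower sc_name == "loss" then loss_name else sc_name
  (PySem.List.enumerate classes).foldl (pvClassStep sc_name) start

def get_sc_names (loss_name : String) (classes : List String) : List String :=
  ((get_sc_types "title").getD []).map (pvProcessTitle loss_name classes)

-- ===== PORT B =====
def get_sc_names_alt (loss_name : String) (classes : List String) : List String :=
  let first := if _h : 0 < classes.length then classes[0] else "class0"
  let second := if _h : 1 < classes.length then classes[1] else "class1"
  [loss_name, "Accuracy (%)",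
   "Accuracy on " ++ first ++ " trials (%)",
   "Accuracy on " ++ second ++ " trials (%)",
   "Balanced accuracy (%)"]

-- ===== PRECONDITION & SPEC =====
def Spec_get_sc_names (loss_name : String) (classes : List String) (out : List String) : Prop := out = get_sc_names_alt loss_name classes
instance (loss_name : String) (classes : List String) (out : List String) : Decidable (Spec_get_sc_names loss_name classes out) := by unfold Spec_get_sc_names; infer_instance

-- ===== CLAIM (what is proved, stated in full; the proofs are below) =====
def Claim_equal_get_sc_names : Prop := ∀ (loss_name : String) (classes : List String), Dom_get_sc_names loss_name classes → Spec_get_sc_names loss_name classes (get_sc_names loss_name classes)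

-- ===== LEMMAS AND PROOFS =====

-- decimal digit characters
def pvDigits : List Char := ['0','1','2','3','4','5','6','7','8','9']

lemma pvDigitChar_mem (m : Nat) (h : m < 10) : Nat.digitChar m ∈ pvDigits := by
  interval_cases m <;> decide

-- Nat.toDigitsCore pushes a nonempty block of digit characters in front of ds.
lemma pvToDigitsCore_suffix (fuel : Nat) : ∀ (n : Nat) (ds : List Char),
    ∃ pre, Nat.toDigitsCore 10 fuel n ds = pre ++ ds ∧ (∀ c ∈ pre, c ∈ pvDigits) ∧
      (0 < fuel → pre ≠ []) := by
  induction fuel with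
  | zero => intro n ds; exact ⟨[], by simp [Nat.toDigitsCore]⟩
  | succ fuel ih =>
    intro n ds
    rw [Nat.toDigitsCore]
    by_cases h : n / 10 = 0
    · refine ⟨[Nat.digitChar (n % 10)], by simp [h], ?_, by simp⟩
      intro c hc
      simp at hc
      subst hc
      exact pvDigitChar_mem _ (Nat.mod_lt _ (by omega))
    · simp only [h, if_false]
      obtain ⟨pre, heq, hdig, _⟩ := ih (n / 10) (Nat.digitChar (n % 10) :: ds)
      refine ⟨pre ++ [Nat.digitChar (n % 10)], by simp [heq], ?_, by simp⟩
      intro c hc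
      rcases List.mem_append.1 hc with h1 | h1
      · exact hdig c h1
      · simp at h1; subst h1
        exact pvDigitChar_mem _ (Nat.mod_lt _ (by omega))

lemma pvToDigits_ne_nil (n : Nat) : Nat.toDigits 10 n ≠ [] := by
  obtain ⟨pre, heq, _, hne⟩ := pvToDigitsCore_suffix (n + 1) n []
  simp [Nat.toDigits, heq]
  exact hne (by omega)

lemma pvToDigits_digits (n : Nat) : ∀ c ∈ Nat.toDigits 10 n, c ∈ pvDigits := by
  obtain ⟨pre, heq, hdig, _⟩ := pvToDigitsCore_suffix (n + 1) n []
  simp only [Nat.toDigits, heq, List.append_nil]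
  exact hdig

lemma pvToDigits_singleton (n : Nat) (c : Char) (h : Nat.toDigits 10 n = [c]) :
    n < 10 ∧ Nat.digitChar n = c := by
  by_cases hn : n < 10
  · refine ⟨hn, ?_⟩
    rw [Nat.toDigits, Nat.toDigitsCore] at h
    simp [Nat.div_eq_of_lt hn, Nat.mod_eq_of_lt hn] at h
    exact h
  · exfalso
    rw [Nat.toDigits, Nat.toDigitsCore] at h
    have hd : ¬ (n / 10 = 0) := by omega
    simp only [hd, if_false] at h
    obtain ⟨pre, heq, _, hne⟩ := pvToDigitsCore_suffix n (n / 10) [Nat.digitChar (n % 10)]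
    rw [heq] at h
    have hlen := congrArg List.length h
    simp at hlen
    have hpre : pre = [] := by
      cases pre with
      | nil => rfl
      | cons a t => simp at hlen
    exact hne (by omega) hpre

lemma pvDigitChar_zero (m : Nat) (h : m < 10) (hc : Nat.digitChar m = '0') : m = 0 := by
  interval_cases m <;> revert hc <;> decide

lemma pvDigitChar_one (m : Nat) (h : m < 10) (hc : Nat.digitChar m = '1') : m = 1 := by
  interval_cases m <;> revert hc <;> decide

-- the two class-bearing titles as character lists
def pvT2 : List Char := ['A','c','c','u','r','a','c','y',' ','o','n',' ','c','l','a','s','s','0',' ','t','r','i','a','l','s',' ','(','%',')']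
def pvT3 : List Char := ['A','c','c','u','r','a','c','y',' ','o','n',' ','c','l','a','s','s','1',' ','t','r','i','a','l','s',' ','(','%',')']

lemma pvInfix_t2 (ds : List Char) (hne : ds ≠ []) (hdig : ∀ c ∈ ds, c ∈ pvDigits) :
    PySem.Chars.isIn ('c'::'l'::'a'::'s'::'s'::ds) pvT2 = true ↔ ds = ['0'] := by
  constructor
  · intro h
    rw [← PySem.Chars.exists_prefix_drop_iff_isIn] at h
    obtain ⟨k, hk⟩ := h
    have hk29 : k < 29 := by
      by_contra hge
      rw [List.drop_eq_nil_of_le (by simp [pvT2]; omega)] at hk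
      simp at hk
    interval_cases k <;>
      simp only [pvT2, List.drop, List.cons_prefix_cons, List.prefix_nil] at hk <;>
      simp_all
    -- k = 12 leaves: ds <+: ['0',' ','t','r','i','a','l','s',' ','(','%',')']
    · cases ds with
      | nil => exact absurd rfl hne
      | cons d t =>
        rw [List.cons_prefix_cons] at hk
        obtain ⟨hd, ht⟩ := hk
        subst hd
        cases t with
        | nil => rfl
        | cons e u =>
          rw [List.cons_prefix_cons] at ht
          have hmem : e ∈ pvDigits := hdig e (by simp)
          rw [ht.1] at hmem
          simp [pvDigits] at hmem
  · intro h; subst h; decide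

lemma pvInfix_t3 (ds : List Char) (hne : ds ≠ []) (hdig : ∀ c ∈ ds, c ∈ pvDigits) :
    PySem.Chars.isIn ('c'::'l'::'a'::'s'::'s'::ds) pvT3 = true ↔ ds = ['1'] := by
  constructor
  · intro h
    rw [← PySem.Chars.exists_prefix_drop_iff_isIn] at h
    obtain ⟨k, hk⟩ := h
    have hk29 : k < 29 := by
      by_contra hge
      rw [List.drop_eq_nil_of_le (by simp [pvT3]; omega)] at hk
      simp at hk
    interval_cases k <;>
      simp only [pvT3, List.drop, List.cons_prefix_cons, List.prefix_nil] at hk <;>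
      simp_all
    · cases ds with
      | nil => exact absurd rfl hne
      | cons d t =>
        rw [List.cons_prefix_cons] at hk
        obtain ⟨hd, ht⟩ := hk
        subst hd
        cases t with
        | nil => rfl
        | cons e u =>
          rw [List.cons_prefix_cons] at ht
          have hmem : e ∈ pvDigits := hdig e (by simp)
          rw [ht.1] at hmem
          simp [pvDigits] at hmem
  · intro h; subst h; decide

-- generic "class{j}" as characters, for a nonnegative enumerate index j
lemma pvGeneric_toList (j : Int) (hj : 0 ≤ j) :
    ("class" ++ PySem.Int.toStr j).toList = 'c'::'l'::'a'::'s'::'s':: Nat.toDigits 10 j.toNat := by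
  have h1 : (PySem.Int.toStr j).toList = PySem.Int.toChars j := PySem.Int.toList_toStr j
  simp [h1, PySem.Int.toChars, not_lt.2 hj]

lemma pvIsIn_t2_iff (j : Int) (hj : 0 ≤ j) :
    PySem.Str.isIn ("class" ++ PySem.Int.toStr j) "Accuracy on class0 trials (%)" = true ↔ j = 0 := by
  have h2 : ("Accuracy on class0 trials (%)" : String).toList = pvT2 := by decide
  rw [PySem.Str.isIn_eq, pvGeneric_toList j hj, h2,
      pvInfix_t2 _ (pvToDigits_ne_nil _) (pvToDigits_digits _)]
  constructor
  · intro h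
    obtain ⟨hlt, hdc⟩ := pvToDigits_singleton _ _ h
    have := pvDigitChar_zero _ hlt hdc
    omega
  · intro h; subst h; decide

lemma pvIsIn_t3_iff (j : Int) (hj : 0 ≤ j) :
    PySem.Str.isIn ("class" ++ PySem.Int.toStr j) "Accuracy on class1 trials (%)" = true ↔ j = 1 := by
  have h2 : ("Accuracy on class1 trials (%)" : String).toList = pvT3 := by decide
  rw [PySem.Str.isIn_eq, pvGeneric_toList j hj, h2,
      pvInfix_t3 _ (pvToDigits_ne_nil _) (pvToDigits_digits _)]
  constructor
  · intro h
    obtain ⟨hlt, hdc⟩ := pvToDigits_singleton _ _ h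
    have := pvDigitChar_one _ hlt hdc
    omega
  · intro h; subst h; decide

-- titles without 'class...' substring: one of the five leading letters is missing
lemma pvNotIn_of (t : String) (c : Char) (hmem : c ∈ ['c','l','a','s','s'])
    (hnot : c ∉ t.toList) (j : Int) :
    PySem.Str.isIn ("class" ++ PySem.Int.toStr j) t = false := by
  rw [PySem.Str.isIn_eq, PySem.Chars.isIn_eq_false_iff]
  intro hinf
  apply hnot
  apply hinf.subset
  have : ("class" ++ PySem.Int.toStr j).toList = "class".toList ++ (PySem.Int.toStr j).toList := by
    simp
  rw [this]
  apply List.mem_append_left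
  simpa using hmem

-- A fold over enumerate-with-start s where every index ≥ s fails the membership test is the identity
lemma pvFoldSkip (t : String) (l : List String) (s : Int) (acc : String)
    (h : ∀ j : Int, s ≤ j → PySem.Str.isIn ("class" ++ PySem.Int.toStr j) t = false) :
    (PySem.List.enumerate l s).foldl (pvClassStep t) acc = acc := by
  induction l generalizing s acc with
  | nil => simp [PySem.List.enumerate]
  | cons x xs ih =>
    rw [PySem.List.enumerate_cons]
    simp only [List.foldl_cons]
    rw [show pvClassStep t acc (s, x) = acc from by
      unfold pvClassStep
      dsimp only
      rw [h s le_rfl]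
      simp]
    refine ih (s + 1) acc ?_
    intro j hj
    exact h j (by omega)

lemma pvTitle0 (loss_name : String) (classes : List String) :
    pvProcessTitle loss_name classes "Loss" = loss_name := by
  unfold pvProcessTitle
  rw [show (PySem.Str.lower "Loss" == "loss") = true from by decide, if_pos rfl]
  exact pvFoldSkip _ _ _ _ (fun j _ => pvNotIn_of _ 'c' (by decide) (by decide) j)

lemma pvTitle1 (loss_name : String) (classes : List String) :
    pvProcessTitle loss_name classes "Accuracy (%)" = "Accuracy (%)" := by
  unfold pvProcessTitle
  rw [show (PySem.Str.lower "Accuracy (%)" == "loss") = false from by decide, if_neg (by simp)]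
  exact pvFoldSkip _ _ _ _ (fun j _ => pvNotIn_of _ 'l' (by decide) (by decide) j)

lemma pvTitle4 (loss_name : String) (classes : List String) :
    pvProcessTitle loss_name classes "Balanced accuracy (%)" = "Balanced accuracy (%)" := by
  unfold pvProcessTitle
  rw [show (PySem.Str.lower "Balanced accuracy (%)" == "loss") = false from by decide, if_neg (by simp)]
  exact pvFoldSkip _ _ _ _ (fun j _ => pvNotIn_of _ 's' (by decide) (by decide) j)

-- replacing "class0"/"class1" in the concrete titles
lemma pvReplace_t2 (c : String) :
    PySem.Str.replace "Accuracy on class0 trials (%)" ("class" ++ PySem.Int.toStr 0) c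
      = "Accuracy on " ++ c ++ " trials (%)" := by
  rw [← String.toList_inj]
  rw [PySem.Str.toList_replace, pvGeneric_toList 0 le_rfl]
  rw [show ('c'::'l'::'a'::'s'::'s':: Nat.toDigits 10 (Int.toNat 0) : List Char)
        = "class0".toList from by decide]
  simp [PySem.Chars.replace, PySem.Chars.replace.go]

lemma pvReplace_t3 (c : String) :
    PySem.Str.replace "Accuracy on class1 trials (%)" ("class" ++ PySem.Int.toStr 1) c
      = "Accuracy on " ++ c ++ " trials (%)" := by
  rw [← String.toList_inj]
  rw [PySem.Str.toList_replace, pvGeneric_toList 1 (by decide)]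
  rw [show ('c'::'l'::'a'::'s'::'s':: Nat.toDigits 10 (Int.toNat 1) : List Char)
        = "class1".toList from by decide]
  simp [PySem.Chars.replace, PySem.Chars.replace.go]

lemma pvIsIn_false_of_iff (t : String) (j : Int) (j0 : Int)
    (hiff : PySem.Str.isIn ("class" ++ PySem.Int.toStr j) t = true ↔ j = j0) (hne : j ≠ j0) :
    PySem.Str.isIn ("class" ++ PySem.Int.toStr j) t = false := by
  rcases Bool.eq_false_or_eq_true (PySem.Str.isIn ("class" ++ PySem.Int.toStr j) t) with h | h
  · exact absurd (hiff.1 h) hne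
  · exact h

lemma pvTitle2_nil (loss_name : String) :
    pvProcessTitle loss_name [] "Accuracy on class0 trials (%)" = "Accuracy on class0 trials (%)" := by
  unfold pvProcessTitle
  rw [show (PySem.Str.lower "Accuracy on class0 trials (%)" == "loss") = false from by decide,
      if_neg (by simp)]
  simp [PySem.List.enumerate]

lemma pvTitle2_cons (loss_name c : String) (rest : List String) :
    pvProcessTitle loss_name (c :: rest) "Accuracy on class0 trials (%)"
      = "Accuracy on " ++ c ++ " trials (%)" := by
  unfold pvProcessTitle
  rw [PySem.List.enumerate_cons]
  simp only [List.foldl_cons]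
  rw [show ∀ acc, pvClassStep "Accuracy on class0 trials (%)" acc ((0 : Int), c)
      = "Accuracy on " ++ c ++ " trials (%)" from by
    intro acc
    unfold pvClassStep
    dsimp only
    rw [(pvIsIn_t2_iff 0 le_rfl).2 rfl]
    simp only [if_true]
    exact pvReplace_t2 c]
  refine pvFoldSkip _ _ _ _ ?_
  intro j hj
  exact pvIsIn_false_of_iff _ j 0 (pvIsIn_t2_iff j (by omega)) (by omega)

lemma pvTitle3_nil (loss_name : String) :
    pvProcessTitle loss_name [] "Accuracy on class1 trials (%)" = "Accuracy on class1 trials (%)" := by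
  unfold pvProcessTitle
  rw [show (PySem.Str.lower "Accuracy on class1 trials (%)" == "loss") = false from by decide,
      if_neg (by simp)]
  simp [PySem.List.enumerate]

lemma pvTitle3_single (loss_name c : String) :
    pvProcessTitle loss_name [c] "Accuracy on class1 trials (%)" = "Accuracy on class1 trials (%)" := by
  unfold pvProcessTitle
  rw [show (PySem.Str.lower "Accuracy on class1 trials (%)" == "loss") = false from by decide,
      if_neg (by simp)]
  rw [PySem.List.enumerate_cons]
  simp only [List.foldl_cons]
  rw [show ∀ acc, pvClassStep "Accuracy on class1 trials (%)" acc ((0 : Int), c) = acc from by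
    intro acc
    unfold pvClassStep
    dsimp only
    rw [pvIsIn_false_of_iff _ 0 1 (pvIsIn_t3_iff 0 le_rfl) (by omega)]
    simp]
  simp [PySem.List.enumerate]

lemma pvTitle3_cons2 (loss_name c0 c1 : String) (rest : List String) :
    pvProcessTitle loss_name (c0 :: c1 :: rest) "Accuracy on class1 trials (%)"
      = "Accuracy on " ++ c1 ++ " trials (%)" := by
  unfold pvProcessTitle
  rw [PySem.List.enumerate_cons, PySem.List.enumerate_cons,
      show ((0 : Int) + 1) = 1 from by omega]
  simp only [List.foldl_cons]
  rw [show ∀ acc, pvClassStep "Accuracy on class1 trials (%)" acc ((0 : Int), c0) = acc from by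
    intro acc
    unfold pvClassStep
    dsimp only
    rw [pvIsIn_false_of_iff _ 0 1 (pvIsIn_t3_iff 0 le_rfl) (by omega)]
    simp]
  rw [show ∀ acc, pvClassStep "Accuracy on class1 trials (%)" acc ((1 : Int), c1)
      = "Accuracy on " ++ c1 ++ " trials (%)" from by
    intro acc
    unfold pvClassStep
    dsimp only
    rw [(pvIsIn_t3_iff 1 (by decide)).2 rfl]
    simp only [if_true]
    exact pvReplace_t3 c1]
  refine pvFoldSkip _ _ _ _ ?_
  intro j hj
  exact pvIsIn_false_of_iff _ j 1 (pvIsIn_t3_iff j (by omega)) (by omega)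

-- ===== VERDICT (by name: the statement is the Claim_ definition above) =====
theorem get_sc_names_spec : Claim_equal_get_sc_names := by
  intro loss_name classes _
  unfold Spec_get_sc_names get_sc_names get_sc_names_alt
  rw [show (get_sc_types "title").getD [] =
        ["Loss", "Accuracy (%)", "Accuracy on class0 trials (%)",
         "Accuracy on class1 trials (%)", "Balanced accuracy (%)"] from by decide]
  match classes with
  | [] =>
    simp [pvTitle0, pvTitle1, pvTitle4, pvTitle2_nil, pvTitle3_nil]
  | [c] =>
    simp [pvTitle0, pvTitle1, pvTitle4, pvTitle2_cons, pvTitle3_single]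
  | c0 :: c1 :: rest =>
    simp [pvTitle0, pvTitle1, pvTitle4, pvTitle2_cons, pvTitle3_cons2]
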